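-- pv_equiv track=rewrite | github.com/gokeshenzhen/TraceWeave | src/structural_scanner.py | _extract_enclosing_braces
-- ===== SOURCE A (Python) =====
-- def _extract_enclosing_braces(text: str, pos: int) -> tuple[str | None, int | None]:
--     start = None
--     depth = 0
--     for i in range(pos, -1, -1):
--         char = text[i]
--         if char == "}":
--             depth += 1
--         elif char == "{":
--             if depth == 0:
--                 start = i
--                 break
--             depth -= 1
--     if start is None:
--         return None, None
--
--     end = None
--     depth = 0
--     for i in range(start, len(text)):
--         char = text[i]
--         if char == "{":
--             depth += 1
--         elif char == "}":
--             depth -= 1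
--             if depth == 0:
--                 end = i
--                 break
--     if end is None or not (start <= pos <= end):
--         return None, None
--     return text[start:end + 1], start
-- ===== SOURCE B (Python) =====
-- def _extract_enclosing_braces(text: str, pos: int) -> tuple[str | None, int | None]:
--     # Single forward pass: match braces with a stack of open indices; among the
--     # matched pairs (o, c) with o <= pos < c keep the innermost (largest o).
--     stack = []
--     best = None
--     for i in range(len(text)):
--         ch = text[i]
--         if ch == "{":
--             stack.append(i)
--         elif ch == "}":
--             if stack:
--                 o = stack.pop()
--                 if o <= pos < i and (best is None or best[0] < o):
--                     best = (o, i)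
--     if best is None:
--         return None, None
--     o, c = best
--     return text[o:c + 1], o
-- ===== Notes on version B (the rewrite author's own statement) =====
-- stated objective: alternative
-- what changed: Replaces A's backward scan from pos plus a second forward scan with a single left-to-right pass that matches braces on a stack of open indices and keeps the innermost matched pair (o, c) with o <= pos < c.
import Mathlib
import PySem

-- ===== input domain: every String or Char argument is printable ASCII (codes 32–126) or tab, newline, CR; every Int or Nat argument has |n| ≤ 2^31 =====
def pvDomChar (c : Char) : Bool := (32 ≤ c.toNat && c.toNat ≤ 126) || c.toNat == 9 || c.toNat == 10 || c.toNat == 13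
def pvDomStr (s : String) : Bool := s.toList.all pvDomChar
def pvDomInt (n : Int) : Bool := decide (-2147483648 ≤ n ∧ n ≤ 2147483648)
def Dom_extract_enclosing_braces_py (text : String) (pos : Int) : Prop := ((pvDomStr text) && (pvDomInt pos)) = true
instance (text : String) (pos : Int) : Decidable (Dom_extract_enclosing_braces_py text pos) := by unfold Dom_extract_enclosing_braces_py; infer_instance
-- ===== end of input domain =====

-- B is an alternative single forward stack pass (A scans backward then forward from pos);
-- equivalence is over the return value on inputs with pos < len(text) (elsewhere A raises IndexError).

-- ===== PORT A =====
-- backward loop `for i in range(pos, -1, -1)` of A, ported as descending structural recursion;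
-- `none` where Python's text[i] raises (only reachable at the top call, when pos >= len(text)).
def aBack (cs : List Char) : Nat → Int → Option Nat
  | 0, depth =>
    match cs[0]? with
    | none => none
    | some c =>
      if c = '}' then none
      else if c = '{' then (if depth = 0 then some 0 else none)
      else none
  | (i+1), depth =>
    match cs[i+1]? with
    | none => none
    | some c =>
      if c = '}' then aBack cs i (depth + 1)
      else if c = '{' then (if depth = 0 then some (i+1) else aBack cs i (depth - 1))
      else aBack cs i depth

-- forward loop `for i in range(start, len(text))` of A
def aFwd (cs : List Char) : Nat → Nat → Int → Option Nat
  | 0, _, _ => none      -- fuel exhausted; unreachable from the top-level call (fuel = cs.length)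
  | fuel+1, i, depth =>
    match cs[i]? with
    | none => none
    | some c =>
      if c = '{' then aFwd cs fuel (i+1) (depth + 1)
      else if c = '}' then (if depth - 1 = 0 then some i else aFwd cs fuel (i+1) (depth - 1))
      else aFwd cs fuel (i+1) depth

def extract_enclosing_braces_py (text : String) (pos : Int) : Option String × Option Int :=
  let cs := text.toList
  -- range(pos, -1, -1) is empty for pos < 0, so start stays None
  if pos < 0 then (none, none)
  else
    match aBack cs pos.toNat 0 with
    | none => (none, none)
    | some s =>
      match aFwd cs cs.length s 0 with
      | none => (none, none)
      | some e =>
        if (s : Int) ≤ pos ∧ pos ≤ (e : Int) then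
          (some (PySem.Str.slice text (some (s : Int)) (some ((e : Int) + 1))), some (s : Int))
        else (none, none)

-- ===== PORT B =====
-- single forward pass of Source B: stack of open-brace indices, pop on '}',
-- keep the innermost matched pair (o, c) with o <= pos < c.
def bScan (cs : List Char) (pos : Int) : Nat → Nat → List Nat → Option (Nat × Nat) →
    Option (Nat × Nat)
  | 0, _, _, best => best      -- fuel exhausted; unreachable from the top-level call (fuel = cs.length)
  | fuel+1, i, stack, best =>
    match cs[i]? with
    | none => best
    | some c =>
      if c = '{' then bScan cs pos fuel (i+1) (i :: stack) best
      else if c = '}' then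
        match stack with
        | [] => bScan cs pos fuel (i+1) stack best
        | o :: rest =>
          if decide ((o : Int) ≤ pos) && decide (pos < (i : Int)) &&
              (match best with | none => true | some b => decide (b.1 < o)) then
            bScan cs pos fuel (i+1) rest (some (o, i))
          else bScan cs pos fuel (i+1) rest best
      else bScan cs pos fuel (i+1) stack best

def extract_enclosing_braces_py_alt (text : String) (pos : Int) : Option String × Option Int :=
  let cs := text.toList
  match bScan cs pos cs.length 0 [] none with
  | none => (none, none)
  | some (o, c) =>
    (some (PySem.Str.slice text (some (o : Int)) (some ((c : Int) + 1))), some (o : Int))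

-- ===== PRECONDITION & SPEC =====
-- Pre_ excludes exactly pos >= len(text), where A raises IndexError on text[pos] (B returns (none, none) there).
def Pre_extract_enclosing_braces_py (text : String) (pos : Int) : Prop :=
  pos < (text.toList.length : Int)
instance (text : String) (pos : Int) : Decidable (Pre_extract_enclosing_braces_py text pos) := by
  unfold Pre_extract_enclosing_braces_py; infer_instance

def pvWitness_extract_enclosing_braces_py : String × Int := ("{a}", 1)

def Spec_extract_enclosing_braces_py (text : String) (pos : Int) (out : Option String × Option Int) : Prop :=
  out = extract_enclosing_braces_py_alt text pos
instance (text : String) (pos : Int) (out : Option String × Option Int) :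
    Decidable (Spec_extract_enclosing_braces_py text pos out) := by
  unfold Spec_extract_enclosing_braces_py; infer_instance

-- ===== CLAIM (what is proved, stated in full; the proofs are below) =====
def Claim_equal_extract_enclosing_braces_py : Prop :=
  ∀ (text : String) (pos : Int), Dom_extract_enclosing_braces_py text pos →
    Pre_extract_enclosing_braces_py text pos →
    Spec_extract_enclosing_braces_py text pos (extract_enclosing_braces_py text pos)

-- ===== LEMMAS AND PROOFS =====

-- The canonical forward brace-matching stack: stk cs n = indices of open braces
-- still unmatched after processing cs[0..n-1] (head = innermost).
def stkStep (st : List Nat) (n : Nat) (c : Char) : List Nat :=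
  if c = '{' then n :: st else if c = '}' then st.tail else st

def stk (cs : List Char) : Nat → List Nat
  | 0 => []
  | n+1 =>
    match cs[n]? with
    | none => stk cs n
    | some c => stkStep (stk cs n) n c

theorem stk_mem_lt (cs : List Char) : ∀ n j, j ∈ stk cs n → j < n := by
  intro n
  induction n with
  | zero => intro j h; simp [stk] at h
  | succ n ih =>
    intro j h
    rw [stk] at h
    cases hc : cs[n]? with
    | none => rw [hc] at h; exact Nat.lt_succ_of_lt (ih j h)
    | some c =>
      rw [hc] at h
      dsimp only at h
      unfold stkStep at h
      split_ifs at h with h1 h2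
      · rcases List.mem_cons.mp h with rfl | h'
        · omega
        · exact Nat.lt_succ_of_lt (ih j h')
      · exact Nat.lt_succ_of_lt (ih j (List.mem_of_mem_tail h))
      · exact Nat.lt_succ_of_lt (ih j h)

theorem stk_pairwise (cs : List Char) : ∀ n, (stk cs n).Pairwise (· > ·) := by
  intro n
  induction n with
  | zero => simp [stk]
  | succ n ih =>
    rw [stk]
    cases hc : cs[n]? with
    | none => exact ih
    | some c =>
      dsimp only
      unfold stkStep
      split_ifs with h1 h2
      · exact List.Pairwise.cons (fun x hx => stk_mem_lt cs n x hx) ih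
      · exact ih.sublist (List.tail_sublist _)
      · exact ih

theorem stk_mem_succ (cs : List Char) (n j : Nat) (h : j ∈ stk cs (n+1)) :
    j ∈ stk cs n ∨ j = n := by
  rw [stk] at h
  cases hc : cs[n]? with
  | none => rw [hc] at h; exact Or.inl h
  | some c =>
    rw [hc] at h
    dsimp only at h
    unfold stkStep at h
    split_ifs at h with h1 h2
    · rcases List.mem_cons.mp h with rfl | h'
      · exact Or.inr rfl
      · exact Or.inl h'
    · exact Or.inl (List.mem_of_mem_tail h)
    · exact Or.inl h

theorem stk_mem_char (cs : List Char) : ∀ n j, j ∈ stk cs n → cs[j]? = some '{' := by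
  intro n
  induction n with
  | zero => intro j h; simp [stk] at h
  | succ n ih =>
    intro j h
    rw [stk] at h
    cases hc : cs[n]? with
    | none => rw [hc] at h; exact ih j h
    | some c =>
      rw [hc] at h
      dsimp only at h
      unfold stkStep at h
      split_ifs at h with h1 h2
      · rcases List.mem_cons.mp h with rfl | h'
        · rw [hc, h1]
        · exact ih j h'
      · exact ih j (List.mem_of_mem_tail h)
      · exact ih j h

-- a pop event: at index e the char is '}' and s is on top of the stack
def PopAt (cs : List Char) (s e : Nat) : Prop := cs[e]? = some '}' ∧ (stk cs e).head? = some s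

theorem popAt_mem (cs : List Char) (s e : Nat) (h : PopAt cs s e) : s ∈ stk cs e := by
  obtain ⟨t, ht⟩ := List.head?_eq_some_iff.mp h.2
  rw [ht]; exact List.mem_cons_self

theorem popAt_not_mem_later (cs : List Char) (s e : Nat) (h : PopAt cs s e) :
    ∀ n, e < n → s ∉ stk cs n := by
  have hse : s < e := stk_mem_lt cs e s (popAt_mem cs s e h)
  have hbase : s ∉ stk cs (e+1) := by
    obtain ⟨t, ht⟩ := List.head?_eq_some_iff.mp h.2
    have hpw := stk_pairwise cs e
    rw [ht] at hpw
    rw [stk, h.1]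
    unfold stkStep
    simp only [if_neg (by decide : ¬ ('}' : Char) = '{'), ht, List.tail_cons]
    intro hmem
    exact absurd ((List.pairwise_cons.mp hpw).1 s hmem) (lt_irrefl s)
  intro n hn
  induction n with
  | zero => omega
  | succ n ih =>
    rcases Nat.lt_or_ge e n with hlt | hge
    · intro hmem
      rcases stk_mem_succ cs n s hmem with h' | rfl
      · exact ih hlt h'
      · omega
    · have : n = e := by omega
      subst this
      exact hbase

theorem popAt_unique (cs : List Char) (s e1 e2 : Nat) (h1 : PopAt cs s e1) (h2 : PopAt cs s e2) :
    e1 = e2 := by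
  rcases lt_trichotomy e1 e2 with hlt | heq | hgt
  · exact absurd (popAt_mem cs s e2 h2) (popAt_not_mem_later cs s e1 h1 e2 hlt)
  · exact heq
  · exact absurd (popAt_mem cs s e1 h1) (popAt_not_mem_later cs s e2 h2 e1 hgt)

-- first pop of s at index >= i
def firstPop (cs : List Char) (s : Nat) (i : Nat) : Option Nat :=
  match h : cs[i]? with
  | none => none
  | some c => if c = '}' ∧ (stk cs i).head? = some s then some i else firstPop cs s (i+1)
termination_by cs.length - i
decreasing_by all_goals (obtain ⟨hl, -⟩ := List.getElem?_eq_some_iff.mp h; omega)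

theorem firstPop_some (cs : List Char) (s : Nat) :
    ∀ i e, firstPop cs s i = some e → PopAt cs s e ∧ i ≤ e := by
  intro i
  fun_induction firstPop cs s i with
  | case1 i h => intro e he; simp at he
  | case2 i c h hcond => intro e he
                         cases he
                         exact ⟨⟨by rw [h, hcond.1], hcond.2⟩, le_refl _⟩
  | case3 i c h hcond ih => intro e he
                            obtain ⟨hp, hle⟩ := ih e he
                            exact ⟨hp, by omega⟩

theorem firstPop_eq_some (cs : List Char) (s e : Nat) (hp : PopAt cs s e) :
    ∀ i, i ≤ e → firstPop cs s i = some e := by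
  have helen : e < cs.length := by
    obtain ⟨h, -⟩ := List.getElem?_eq_some_iff.mp hp.1
    exact h
  intro i
  have : ∀ d i, e - i = d → i ≤ e → firstPop cs s i = some e := by
    intro d
    induction d with
    | zero =>
      intro i hd hle
      have : i = e := by omega
      subst this
      rw [firstPop.eq_def, hp.1]
      dsimp only
      rw [if_pos ⟨rfl, hp.2⟩]
    | succ d ihd =>
      intro i hd hle
      have hi : i < e := by omega
      have hc : cs[i]? = some cs[i] := List.getElem?_eq_getElem (by omega)
      rw [firstPop.eq_def, hc]
      dsimp only
      have hcond : ¬ (cs[i] = '}' ∧ (stk cs i).head? = some s) := by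
        intro hcnd
        have : PopAt cs s i := ⟨by rw [hc, hcnd.1], hcnd.2⟩
        have := popAt_unique cs s i e this hp
        omega
      rw [if_neg hcond]
      exact ihd (i+1) (by omega) (by omega)
  exact fun hle => this (e - i) i rfl hle

-- A's backward scan reads the d-th element (from the top) of the forward stack
theorem aBack_eq (cs : List Char) :
    ∀ i, i < cs.length → ∀ d : Nat, aBack cs i (d : Int) = (stk cs (i+1))[d]? := by
  intro i
  induction i with
  | zero =>
    intro hlen d
    have hc : cs[0]? = some (cs[0]'hlen) := List.getElem?_eq_getElem hlen
    have hstk1 : stk cs 1 = stkStep (stk cs 0) 0 (cs[0]'hlen) := by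
      conv_lhs => rw [show (1:Nat) = 0 + 1 from rfl, stk]
      rw [hc]
    rw [aBack, hc, hstk1]
    dsimp only
    unfold stkStep
    by_cases h1 : (cs[0]'hlen) = '}'
    · rw [h1]
      rw [if_pos rfl, if_neg (by decide), if_pos rfl]
      simp [show stk cs 0 = [] from rfl]
    · by_cases h2 : (cs[0]'hlen) = '{'
      · rw [h2]
        rw [if_neg (by decide), if_pos rfl, if_pos rfl]
        cases d with
        | zero => simp
        | succ d => rw [if_neg (by push_cast; omega)]; simp [show stk cs 0 = [] from rfl]
      · rw [if_neg h1, if_neg h2, if_neg h2, if_neg h1]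
        simp [show stk cs 0 = [] from rfl]
  | succ i ih =>
    intro hlen d
    have hilen : i < cs.length := by omega
    have hc : cs[i+1]? = some (cs[i+1]'hlen) := List.getElem?_eq_getElem hlen
    have hstk2 : stk cs (i+1+1) = stkStep (stk cs (i+1)) (i+1) (cs[i+1]'hlen) := by
      rw [stk, hc]
    rw [aBack, hc, hstk2]
    dsimp only
    unfold stkStep
    by_cases h1 : (cs[i+1]'hlen) = '}'
    · rw [h1]
      rw [if_pos rfl, if_neg (by decide), if_pos rfl]
      have hca : ((d : Int) + 1) = ((d + 1 : Nat) : Int) := by push_cast; ring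
      rw [hca, ih hilen (d+1), List.getElem?_tail]
    · by_cases h2 : (cs[i+1]'hlen) = '{'
      · rw [h2]
        rw [if_neg (by decide), if_pos rfl, if_pos rfl]
        cases d with
        | zero => simp
        | succ d =>
          have hca : (((d+1 : Nat) : Int) - 1) = ((d : Nat) : Int) := by push_cast; ring
          rw [if_neg (by push_cast; omega), hca, ih hilen d]
          simp
      · rw [if_neg h1, if_neg h2, if_neg h2, if_neg h1]
        exact ih hilen d

-- A's forward scan from inside a pair finds the first pop of s
theorem aFwd_eq (cs : List Char) (s : Nat) :
    ∀ fuel i t r, cs.length ≤ i + fuel → stk cs i = t ++ s :: r →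
      aFwd cs fuel i ((t.length : Int) + 1) = firstPop cs s i := by
  intro fuel
  induction fuel with
  | zero =>
    intro i t r hfuel hstk
    rw [aFwd, firstPop.eq_def, List.getElem?_eq_none_iff.mpr (by omega)]
  | succ fuel ih =>
    intro i t r hfuel hstk
    rw [aFwd, firstPop.eq_def]
    cases hc : cs[i]? with
    | none => rfl
    | some c =>
      have hilen : i < cs.length := by
        obtain ⟨h, -⟩ := List.getElem?_eq_some_iff.mp hc
        exact h
      have hstk1 : stk cs (i+1) = stkStep (stk cs i) i c := by rw [stk, hc]
      dsimp only
      by_cases hbr1 : c = '{'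
      · rw [if_pos hbr1]
        have hcast : (t.length : Int) + 1 + 1 = (((i :: t).length : Nat) : Int) + 1 := by
          simp only [List.length_cons]; push_cast; ring
        rw [hcast, ih (i+1) (i :: t) r (by omega)
          (by rw [hstk1]; unfold stkStep; rw [if_pos hbr1, hstk]; rfl)]
        rw [if_neg (by intro hcnd; rw [hbr1] at hcnd; exact absurd hcnd.1 (by decide))]
      · by_cases hbr2 : c = '}'
        · rw [if_neg hbr1, if_pos hbr2]
          cases t with
          | nil =>
            rw [if_pos (by norm_num)]
            rw [if_pos ⟨hbr2, by rw [hstk]; rfl⟩]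
          | cons x t' =>
            rw [if_neg (by simp only [List.length_cons]; push_cast; omega)]
            have hxs : x > s := by
              have hpw := stk_pairwise cs i
              rw [hstk] at hpw
              exact (List.pairwise_cons.mp hpw).1 s
                (List.mem_append_right _ List.mem_cons_self)
            have hcast : ((x :: t').length : Int) + 1 - 1 = ((t'.length : Nat) : Int) + 1 := by
              simp only [List.length_cons]; push_cast; ring
            rw [hcast, ih (i+1) t' r (by omega)
              (by rw [hstk1]; unfold stkStep; rw [if_neg hbr1, if_pos hbr2, hstk]; rfl)]
            rw [if_neg (by
              intro hcnd
              rw [hstk] at hcnd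
              simp at hcnd
              omega)]
        · rw [if_neg hbr1, if_neg hbr2]
          rw [ih (i+1) t r (by omega)
            (by rw [hstk1]; unfold stkStep; rw [if_neg hbr1, if_neg hbr2]; exact hstk)]
          rw [if_neg (fun hcnd => hbr2 hcnd.1)]

-- what B computes, characterised through the stack at pos+1
def targetB (cs : List Char) (p : Nat) : Option (Nat × Nat) :=
  match (stk cs (p+1)).head? with
  | none => none
  | some s =>
    match firstPop cs s (s+1) with
    | none => none
    | some e => some (s, e)

theorem bScan_neg (cs : List Char) (pos : Int) (hpos : pos < 0) :
    ∀ fuel i stack, bScan cs pos fuel i stack none = none := by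
  intro fuel
  induction fuel with
  | zero => intro i stack; rfl
  | succ fuel ih =>
    intro i stack
    rw [bScan.eq_def]
    dsimp only
    cases hc : cs[i]? with
    | none => rfl
    | some c =>
      dsimp only
      by_cases h1 : c = '{'
      · rw [if_pos h1]; exact ih _ _
      · by_cases h2 : c = '}'
        · rw [if_neg h1, if_pos h2]
          cases stack with
          | nil => exact ih _ _
          | cons o rest =>
            dsimp only
            rw [if_neg (by
              simp only [Bool.and_eq_true, decide_eq_true_eq]
              rintro ⟨⟨h3, -⟩, -⟩
              omega)]
            exact ih _ _
        · rw [if_neg h1, if_neg h2]; exact ih _ _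

theorem bScan_final (cs : List Char) (p : Nat) (hp : p < cs.length) :
    ∀ i stack best, cs.length ≤ i → stack = stk cs i →
      ((i ≤ p + 1 ∧ best = none) ∨
        (p < i ∧ ∃ k t, k ≤ (stk cs (p+1)).length ∧ stack = t ++ (stk cs (p+1)).drop k ∧
          (∀ x ∈ t, p < x) ∧
          ((k = 0 ∧ best = none) ∨
            (1 ≤ k ∧ ∃ s e, (stk cs (p+1)).head? = some s ∧ PopAt cs s e ∧ p < e ∧ e < i ∧
              best = some (s, e))))) →
      best = targetB cs p := by
  intro i stack best hile hstack hinv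
  have hnot : ∀ s, s ∈ stk cs i → firstPop cs s (s+1) = none := by
    intro s hmem
    cases hfp : firstPop cs s (s+1) with
    | none => rfl
    | some e =>
      obtain ⟨hpa, -⟩ := firstPop_some cs s (s+1) e hfp
      obtain ⟨helen, -⟩ := List.getElem?_eq_some_iff.mp hpa.1
      exact absurd hmem (popAt_not_mem_later cs s e hpa i (by omega))
  rcases hinv with ⟨hip, rfl⟩ | ⟨hpi, k, t, hk, hdec, ht, hbest⟩
  · -- i = p+1 and stack is exactly the stack at pos+1
    have hieq : i = p + 1 := by omega
    unfold targetB
    cases hs : (stk cs (p+1)).head? with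
    | none => rfl
    | some s =>
      obtain ⟨t', ht'⟩ := List.head?_eq_some_iff.mp hs
      dsimp only
      rw [hnot s (by rw [hieq, ht']; exact List.mem_cons_self)]
  · rcases hbest with ⟨hk0, rfl⟩ | ⟨hk1, s, e, hs, hpa, hpe, hei, rfl⟩
    · subst hk0
      unfold targetB
      cases hs : (stk cs (p+1)).head? with
      | none => rfl
      | some s =>
        obtain ⟨t', ht'⟩ := List.head?_eq_some_iff.mp hs
        have hmem : s ∈ stk cs i := by
          rw [← hstack, hdec, List.drop_zero, ht']
          exact List.mem_append_right _ List.mem_cons_self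
        dsimp only
        rw [hnot s hmem]
    · unfold targetB
      rw [hs]
      dsimp only
      have hsle : s ≤ p := by
        obtain ⟨t', ht'⟩ := List.head?_eq_some_iff.mp hs
        have := stk_mem_lt cs (p+1) s (by rw [ht']; exact List.mem_cons_self)
        omega
      rw [firstPop_eq_some cs s e hpa (s+1) (by omega)]

theorem bScan_main (cs : List Char) (p : Nat) (hp : p < cs.length) :
    ∀ fuel i stack best, cs.length ≤ i + fuel → stack = stk cs i →
      ((i ≤ p + 1 ∧ best = none) ∨
        (p < i ∧ ∃ k t, k ≤ (stk cs (p+1)).length ∧ stack = t ++ (stk cs (p+1)).drop k ∧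
          (∀ x ∈ t, p < x) ∧
          ((k = 0 ∧ best = none) ∨
            (1 ≤ k ∧ ∃ s e, (stk cs (p+1)).head? = some s ∧ PopAt cs s e ∧ p < e ∧ e < i ∧
              best = some (s, e))))) →
      bScan cs (p : Int) fuel i stack best = targetB cs p := by
  intro fuel
  induction fuel with
  | zero =>
    intro i stack best hfuel hstack hinv
    rw [show bScan cs (p : Int) 0 i stack best = best from rfl]
    exact bScan_final cs p hp i stack best (by omega) hstack hinv
  | succ fuel ih =>
    intro i stack best hfuel hstack hinv
    rw [bScan.eq_def]
    dsimp only
    cases hc : cs[i]? with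
    | none =>
      exact bScan_final cs p hp i stack best
        (by rw [List.getElem?_eq_none_iff] at hc; omega) hstack hinv
    | some c =>
      obtain ⟨hilen, -⟩ := List.getElem?_eq_some_iff.mp hc
      have hstk1 : stk cs (i+1) = stkStep (stk cs i) i c := by rw [stk, hc]
      dsimp only
      rcases Nat.lt_or_ge p i with hpi | hpi
      · -- i > p : decomposition form (build it from the first disjunct when i = p+1)
        obtain ⟨k, t, hk, hdec, ht, hbestc⟩ :
            ∃ k t, k ≤ (stk cs (p+1)).length ∧ stack = t ++ (stk cs (p+1)).drop k ∧
              (∀ x ∈ t, p < x) ∧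
              ((k = 0 ∧ best = none) ∨
                (1 ≤ k ∧ ∃ s e, (stk cs (p+1)).head? = some s ∧ PopAt cs s e ∧ p < e ∧ e < i ∧
                  best = some (s, e))) := by
          rcases hinv with ⟨hip, rfl⟩ | ⟨-, h⟩
          · have : i = p + 1 := by omega
            exact ⟨0, [], by omega, by rw [List.drop_zero, List.nil_append, hstack, this],
              by simp, Or.inl ⟨rfl, rfl⟩⟩
          · exact h
        by_cases hbr1 : c = '{'
        · rw [if_pos hbr1]
          refine ih (i+1) (i :: stack) best (by omega)
            (by rw [hstk1]; unfold stkStep; rw [if_pos hbr1, hstack]) ?_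
          refine Or.inr ⟨by omega, k, i :: t, hk, by rw [hdec]; rfl, ?_, ?_⟩
          · intro x hx
            rcases List.mem_cons.mp hx with rfl | hx'
            · omega
            · exact ht x hx'
          · rcases hbestc with h | ⟨hk1, s, e, hs, hpa, hpe, hei, hb⟩
            · exact Or.inl h
            · exact Or.inr ⟨hk1, s, e, hs, hpa, hpe, by omega, hb⟩
        · by_cases hbr2 : c = '}'
          · rw [if_neg hbr1, if_pos hbr2]
            cases hst : stack with
            | nil =>
              have hdrop : (stk cs (p+1)).drop k = [] := by
                rcases List.append_eq_nil_iff.mp (hst ▸ hdec).symm with ⟨-, h⟩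
                exact h
              refine ih (i+1) [] best (by omega)
                (by rw [hstk1]; unfold stkStep
                    rw [if_neg hbr1, if_pos hbr2, ← hstack, hst]; rfl) ?_
              refine Or.inr ⟨by omega, k, [], hk, by rw [List.nil_append, hdrop], by simp, ?_⟩
              rcases hbestc with h | ⟨hk1, s, e, hs, hpa, hpe, hei, hb⟩
              · exact Or.inl h
              · exact Or.inr ⟨hk1, s, e, hs, hpa, hpe, by omega, hb⟩
            | cons o rest =>
              dsimp only
              have hstk1' : stk cs (i+1) = rest := by
                rw [hstk1]; unfold stkStep
                rw [if_neg hbr1, if_pos hbr2, ← hstack, hst]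
                rfl
              cases ht' : t with
              | cons x t'' =>
                -- the popped index was pushed after pos: it cannot qualify
                have hox : o = x ∧ rest = t'' ++ (stk cs (p+1)).drop k := by
                  rw [ht'] at hdec
                  rw [hst] at hdec
                  exact ⟨by injection hdec, by injection hdec⟩
                have hop : p < o := by
                  rw [hox.1]; exact ht x (by rw [ht']; exact List.mem_cons_self)
                rw [if_neg (by
                  simp only [Bool.and_eq_true, decide_eq_true_eq]
                  rintro ⟨⟨h3, -⟩, -⟩
                  omega)]
                refine ih (i+1) rest best (by omega) hstk1'.symm ?_
                refine Or.inr ⟨by omega, k, t'', hk, hox.2, ?_, ?_⟩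
                · intro x' hx'
                  exact ht x' (by rw [ht']; exact List.mem_cons_of_mem _ hx')
                · rcases hbestc with h | ⟨hk1, s, e, hs, hpa, hpe, hei, hb⟩
                  · exact Or.inl h
                  · exact Or.inr ⟨hk1, s, e, hs, hpa, hpe, by omega, hb⟩
              | nil =>
                -- the popped index o is the next element of the pos-stack
                have hSk : (stk cs (p+1)).drop k = o :: rest := by
                  rw [ht', List.nil_append] at hdec
                  rw [← hdec, ← hst, hstack]
                have hkS : k < (stk cs (p+1)).length := by
                  by_contra hge
                  rw [List.drop_eq_nil_of_le (by omega)] at hSk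
                  simp at hSk
                have homem : o ∈ stk cs (p+1) :=
                  List.mem_of_mem_drop (by rw [hSk]; exact List.mem_cons_self)
                have hole : o ≤ p := by
                  have := stk_mem_lt cs (p+1) o homem
                  omega
                have hdropk1 : (stk cs (p+1)).drop (k+1) = rest := by
                  rw [List.drop_add_one_eq_tail_drop, hSk, List.tail_cons]
                rcases hbestc with ⟨hk0, hbnone⟩ | ⟨hk1, s, e, hs, hpa, hpe, hei, hb⟩
                · -- first qualifying pop: record it
                  subst hbnone
                  subst hk0
                  have hheadS : (stk cs (p+1)).head? = some o := by
                    rw [List.drop_zero] at hSk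
                    rw [hSk]; rfl
                  rw [if_pos (by
                    simp only [Bool.and_eq_true, decide_eq_true_eq]
                    exact ⟨⟨by omega, by omega⟩, trivial⟩)]
                  refine ih (i+1) rest (some (o, i)) (by omega) hstk1'.symm ?_
                  refine Or.inr ⟨by omega, 1, [], by omega,
                    by rw [List.nil_append, ← hdropk1], by simp, ?_⟩
                  refine Or.inr ⟨le_refl 1, o, i, hheadS, ⟨hc.trans (by rw [hbr2]), ?_⟩,
                    by omega, by omega, rfl⟩
                  rw [← hstack, hst]; rfl
                · -- a later, shallower pop: best is kept
                  have hos : o < s := by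
                    obtain ⟨t3, ht3⟩ := List.head?_eq_some_iff.mp hs
                    have hpw := stk_pairwise cs (p+1)
                    have htake : s ∈ (stk cs (p+1)).take k := by
                      rw [ht3]
                      cases k with
                      | zero => omega
                      | succ k' => simp
                    have := ((List.pairwise_append.mp
                      (by rw [List.take_append_drop k (stk cs (p+1))]; exact hpw)).2.2)
                      s htake o (by rw [hSk]; exact List.mem_cons_self)
                    omega
                  subst hb
                  rw [if_neg (by
                    simp only [Bool.and_eq_true, decide_eq_true_eq]
                    rintro ⟨-, h3⟩
                    omega)]
                  refine ih (i+1) rest (some (s, e)) (by omega) hstk1'.symm ?_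
                  exact Or.inr ⟨by omega, k+1, [], by omega,
                    by rw [List.nil_append, ← hdropk1], by simp,
                    Or.inr ⟨by omega, s, e, hs, hpa, hpe, by omega, rfl⟩⟩
          · rw [if_neg hbr1, if_neg hbr2]
            refine ih (i+1) stack best (by omega)
              (by rw [hstk1]; unfold stkStep; rw [if_neg hbr1, if_neg hbr2]; exact hstack) ?_
            refine Or.inr ⟨by omega, k, t, hk, hdec, ht, ?_⟩
            rcases hbestc with h | ⟨hk1, s, e, hs, hpa, hpe, hei, hb⟩
            · exact Or.inl h
            · exact Or.inr ⟨hk1, s, e, hs, hpa, hpe, by omega, hb⟩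
      · -- i ≤ p : before pos, best stays none and the stack follows stk
        have hbnone : best = none := by
          rcases hinv with ⟨-, h⟩ | ⟨hgt, -⟩
          · exact h
          · omega
        subst hbnone
        have hnext : ∀ stack', stack' = stk cs (i+1) →
            bScan cs (p : Int) fuel (i+1) stack' none = targetB cs p := by
          intro stack' hstack'
          exact ih (i+1) stack' none (by omega) hstack' (Or.inl ⟨by omega, rfl⟩)
        by_cases hbr1 : c = '{'
        · rw [if_pos hbr1]
          exact hnext _ (by rw [hstk1]; unfold stkStep; rw [if_pos hbr1, hstack])
        · by_cases hbr2 : c = '}'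
          · rw [if_neg hbr1, if_pos hbr2]
            cases hst : stack with
            | nil =>
              refine hnext [] ?_
              rw [hstk1]; unfold stkStep
              rw [if_neg hbr1, if_pos hbr2, ← hstack, hst]
              rfl
            | cons o rest =>
              dsimp only
              rw [if_neg (by
                simp only [Bool.and_eq_true, decide_eq_true_eq]
                rintro ⟨⟨-, h3⟩, -⟩
                omega)]
              refine hnext rest ?_
              rw [hstk1]; unfold stkStep
              rw [if_neg hbr1, if_pos hbr2, ← hstack, hst]
              rfl
          · rw [if_neg hbr1, if_neg hbr2]
            exact hnext stack
              (by rw [hstk1]; unfold stkStep; rw [if_neg hbr1, if_neg hbr2]; exact hstack)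

-- ===== VERDICT (by name: the statement is the Claim_ definition above) =====
theorem extract_enclosing_braces_py_spec : Claim_equal_extract_enclosing_braces_py := by
  intro text pos hdom hpre
  unfold Spec_extract_enclosing_braces_py
  unfold Pre_extract_enclosing_braces_py at hpre
  simp only [extract_enclosing_braces_py, extract_enclosing_braces_py_alt]
  by_cases hneg : pos < 0
  · rw [if_pos hneg, bScan_neg text.toList pos hneg]
  · rw [if_neg hneg]
    have h0 : 0 ≤ pos := by omega
    obtain ⟨p, rfl⟩ : ∃ p : Nat, pos = (p : Int) := ⟨pos.toNat, (Int.toNat_of_nonneg h0).symm⟩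
    have hplen : p < text.toList.length := by exact_mod_cast hpre
    simp only [Int.toNat_natCast]
    rw [bScan_main text.toList p hplen text.toList.length 0 [] none (by omega) rfl
      (Or.inl ⟨by omega, rfl⟩)]
    have hA := aBack_eq text.toList p hplen 0
    rw [Nat.cast_zero] at hA
    rw [hA, ← List.head?_eq_getElem?]
    unfold targetB
    cases hhd : (stk text.toList (p+1)).head? with
    | none => rfl
    | some s =>
      dsimp only
      obtain ⟨t', ht'⟩ := List.head?_eq_some_iff.mp hhd
      have hsmem : s ∈ stk text.toList (p+1) := by rw [ht']; exact List.mem_cons_self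
      have hsle : s ≤ p := by have := stk_mem_lt text.toList (p+1) s hsmem; omega
      have hchar : text.toList[s]? = some '{' := stk_mem_char text.toList (p+1) s hsmem
      have hslen : s < text.toList.length := by
        obtain ⟨h, -⟩ := List.getElem?_eq_some_iff.mp hchar; exact h
      obtain ⟨f, hf⟩ : ∃ f, text.toList.length = f + 1 := ⟨text.toList.length - 1, by omega⟩
      have hstks : stk text.toList (s+1) = [] ++ s :: stk text.toList s := by
        rw [stk, hchar]; rfl
      have hAf : aFwd text.toList text.toList.length s 0 = firstPop text.toList s (s+1) := by
        rw [hf, aFwd, hchar]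
        dsimp only
        rw [if_pos rfl]
        have hcast : (0 : Int) + 1 = ((([] : List Nat).length : Nat) : Int) + 1 := by simp
        rw [hcast]
        exact aFwd_eq text.toList s f (s+1) [] (stk text.toList s) (by omega) hstks
      rw [hAf]
      cases hfp : firstPop text.toList s (s+1) with
      | none => rfl
      | some e =>
        dsimp only
        obtain ⟨hpa, hse⟩ := firstPop_some text.toList s (s+1) e hfp
        have hep : p < e := by
          by_contra hle
          exact absurd hsmem (popAt_not_mem_later text.toList s e hpa (p+1) (by omega))
        rw [if_pos ⟨by exact_mod_cast hsle, by exact_mod_cast (by omega : p ≤ e)⟩]
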